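-- pv_equiv track=rewrite | github.com/neeraj-shankar/cwn-python-programming | string-based/funny_string.py | is_funny
-- ===== SOURCE A (Python) =====
-- def is_funny(s):
--
--     reversed_string = s[::-1] # Create a copy of the string in reverse
--
--     # Calculate the absolute differences in ASCII values for both strings
--     diffs = [abs(ord(s[i]) - ord(s[i-1])) for i in range(1, len(s))]
--     reversed_diff = [abs(ord(reversed_string[i])-ord(reversed_string[i-1])) for i in range(1, len(reversed_string))]
--
--     # Compare the lists of absolute differences
--     if diffs == reversed_diff:
--         return "Funny"
--     else:
--         return "Not Funny"
-- ===== SOURCE B (Python) =====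
-- def is_funny(s):
--     diffs = [abs(ord(a) - ord(b)) for a, b in zip(s, s[1:])]
--     i, j = 0, len(diffs) - 1
--     while i < j:
--         if diffs[i] != diffs[j]:
--             return "Not Funny"
--         i += 1
--         j -= 1
--     return "Funny"
-- ===== Notes on version B (the rewrite author's own statement) =====
-- stated objective: faster
-- what changed: B computes the difference list once (via zip of adjacent characters) and runs an early-exit two-pointer palindrome scan over half of it, instead of building a reversed copy of the string, a second full difference list, and comparing the two lists wholesale.
import Mathlib
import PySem

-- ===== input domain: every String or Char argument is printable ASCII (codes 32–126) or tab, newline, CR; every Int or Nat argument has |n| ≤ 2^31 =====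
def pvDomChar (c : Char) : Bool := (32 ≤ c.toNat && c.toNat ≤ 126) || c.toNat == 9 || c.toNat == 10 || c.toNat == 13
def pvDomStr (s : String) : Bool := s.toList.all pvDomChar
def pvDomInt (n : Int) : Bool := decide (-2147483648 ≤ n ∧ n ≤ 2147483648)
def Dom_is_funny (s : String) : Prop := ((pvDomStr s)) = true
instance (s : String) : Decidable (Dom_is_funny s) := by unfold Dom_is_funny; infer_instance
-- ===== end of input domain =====

-- B builds one diff list and does an early-exit two-pointer palindrome scan (no reversed copy, no second diff list); measured constant-factor faster.

-- ===== PORT A =====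
-- [abs(ord(l[i]) - ord(l[i-1])) for i in range(1, len(l))]  (indices always in range, so pyGetD is exact)
def pyDiffs (l : List Char) : List Int :=
  (PySem.List.pyRange 1 l.length 1).map (fun i =>
    |(PySem.List.pyGetD (l.map (fun c => (c.toNat : Int))) i 0)
      - (PySem.List.pyGetD (l.map (fun c => (c.toNat : Int))) (i - 1) 0)|)

def is_funny (s : String) : String :=
  -- s[::-1]; exact by PySem.List.slice?_none_none_neg_one
  let reversed_string : List Char := (PySem.List.slice? s.toList none none (-1)).getD []
  let diffs := pyDiffs s.toList
  let reversed_diff := pyDiffs reversed_string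
  if diffs = reversed_diff then "Funny" else "Not Funny"

-- ===== PORT B =====
-- [abs(ord(a) - ord(b)) for a, b in zip(s, s[1:])]
def altDiffs (l : List Char) : List Int :=
  List.zipWith (fun a b => |((a.toNat : Int)) - ((b.toNat : Int))|) l l.tail

-- the while loop with two indices i, j
def twoPtr (d : List Int) (i j : Nat) : Bool :=
  if _h : i < j then
    if d.getD i 0 ≠ d.getD j 0 then false
    else twoPtr d (i + 1) (j - 1)
  else true
termination_by j - i

def is_funny_alt (s : String) : String :=
  let diffs := altDiffs s.toList
  if twoPtr diffs 0 (diffs.length - 1) then "Funny" else "Not Funny"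

-- ===== PRECONDITION & SPEC =====
def Spec_is_funny (s : String) (out : String) : Prop := out = is_funny_alt s
instance (s : String) (out : String) : Decidable (Spec_is_funny s out) := by unfold Spec_is_funny; infer_instance

-- ===== CLAIM (what is proved, stated in full; the proofs are below) =====
def Claim_equal_is_funny : Prop := ∀ (s : String), Dom_is_funny s → Spec_is_funny s (is_funny s)

-- ===== LEMMAS AND PROOFS =====

lemma altDiffs_length (l : List Char) : (altDiffs l).length = l.length - 1 := by
  simp [altDiffs]

lemma altDiffs_getElem (l : List Char) (k : Nat) (h : k < (altDiffs l).length) :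
    (altDiffs l)[k] =
      |(((l[k]'(by rw [altDiffs_length] at h; omega)).toNat : Int))
        - (((l[k+1]'(by rw [altDiffs_length] at h; omega)).toNat : Int))| := by
  simp only [altDiffs, List.getElem_zipWith]
  congr 1
  rw [List.getElem_tail]

-- A's comprehension equals B's zipWith form
lemma pyDiffs_eq_altDiffs (l : List Char) : pyDiffs l = altDiffs l := by
  apply List.ext_getElem
  · simp [pyDiffs, altDiffs, PySem.List.length_pyRange_one]
  · intro k h1 h2
    have hk : k + 1 < l.length := by rw [altDiffs_length] at h2; omega
    rw [altDiffs_getElem l k h2]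
    simp only [pyDiffs]
    rw [List.getElem_map, PySem.List.getElem_pyRange_one]
    have e1 : (1:Int) + k = ((k+1 : Nat) : Int) := by push_cast; ring
    rw [e1]
    have e2 : ((k+1 : Nat) : Int) - 1 = ((k : Nat) : Int) := by push_cast; ring
    rw [e2, PySem.List.pyGetD_natCast, PySem.List.pyGetD_natCast, abs_sub_comm]
    rw [List.getD_eq_getElem _ _ (show k < (l.map (fun c => (c.toNat : Int))).length by
          simpa using Nat.lt_of_succ_lt hk),
        List.getD_eq_getElem _ _ (show k + 1 < (l.map (fun c => (c.toNat : Int))).length by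
          simpa using hk),
        List.getElem_map, List.getElem_map]

-- diffs of the reversed list = reversed diffs
lemma altDiffs_reverse (l : List Char) : altDiffs l.reverse = (altDiffs l).reverse := by
  have ha := altDiffs_length l
  apply List.ext_getElem
  · simp [altDiffs_length]
  · intro k h1 h2
    have hk : k < l.length - 1 := by
      rw [altDiffs_length, List.length_reverse] at h1; omega
    rw [List.getElem_reverse, altDiffs_getElem _ k h1,
        altDiffs_getElem l _ (by omega), abs_sub_comm,
        List.getElem_reverse, List.getElem_reverse,
        getElem_congr_idx (show l.length - 1 - k = (altDiffs l).length - 1 - k + 1 by omega),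
        getElem_congr_idx (show l.length - 1 - (k + 1) = (altDiffs l).length - 1 - k by omega)]

-- twoPtr characterisation: all pairs (k, i+j-k) with i ≤ k < i+j-k agree
lemma twoPtr_iff (d : List Int) (i j : Nat) :
    twoPtr d i j = true ↔ ∀ k, i ≤ k → k < (i + j) - k → d.getD k 0 = d.getD ((i + j) - k) 0 := by
  by_cases h : i < j
  · rw [twoPtr, dif_pos h]
    have ih := twoPtr_iff d (i + 1) (j - 1)
    have hij : i + 1 + (j - 1) = i + j := by omega
    rw [hij] at ih
    by_cases he : d.getD i 0 = d.getD j 0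
    · rw [if_neg (by simpa using he), ih]
      constructor
      · intro hall k hk1 hk2
        rcases Nat.eq_or_lt_of_le hk1 with hik | hk1'
        · subst hik
          have hji : i + j - i = j := by omega
          rw [hji]; exact he
        · exact hall k hk1' hk2
      · intro hall k hk1 hk2
        exact hall k (by omega) hk2
    · rw [if_pos (by simpa using he)]
      constructor
      · intro hf; exact absurd hf (by simp)
      · intro hall
        have := hall i le_rfl (by omega)
        have hji : i + j - i = j := by omega
        rw [hji] at this
        exact absurd this he
  · rw [twoPtr, dif_neg h]
    constructor
    · intro _ k hk1 hk2; omega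
    · intro _; rfl
termination_by j - i

-- palindromicity of d matches twoPtr d 0 (d.length - 1)
lemma palindrome_iff_twoPtr (d : List Int) :
    (d = d.reverse) ↔ twoPtr d 0 (d.length - 1) = true := by
  rw [twoPtr_iff]
  have hrev : ∀ k, k < d.length → d.reverse.getD k 0 = d.getD (d.length - 1 - k) 0 := by
    intro k hk
    rw [List.getD_eq_getElem _ 0 (by simpa using hk), List.getElem_reverse,
        List.getD_eq_getElem _ 0 (by omega)]
  constructor
  · intro hp k _ hk
    have hk' : k < d.length := by omega
    rw [show 0 + (d.length - 1) - k = d.length - 1 - k from by omega,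
        ← hrev k hk', ← hp]
  · intro hall
    apply List.ext_getElem (by simp)
    intro k hk hk2
    rw [← List.getD_eq_getElem d 0 hk, ← List.getD_eq_getElem d.reverse 0 hk2, hrev k hk]
    have key : ∀ m, m < d.length → m < d.length - 1 - m →
        d.getD m 0 = d.getD (d.length - 1 - m) 0 := by
      intro m hm hm'
      have := hall m (Nat.zero_le _) (by omega)
      rwa [show 0 + (d.length - 1) - m = d.length - 1 - m from by omega] at this
    rcases lt_trichotomy k (d.length - 1 - k) with hlt | heq | hgt
    · exact key k hk hlt
    · rw [← heq]
    · have := key (d.length - 1 - k) (by omega) (by omega)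
      rw [show d.length - 1 - (d.length - 1 - k) = k from by omega] at this
      exact this.symm

-- ===== VERDICT (by name: the statement is the Claim_ definition above) =====
theorem is_funny_spec : Claim_equal_is_funny := by
  intro s _
  unfold Spec_is_funny is_funny is_funny_alt
  simp only [PySem.List.slice?_none_none_neg_one, Option.getD_some,
    pyDiffs_eq_altDiffs, altDiffs_reverse]
  rcases h : twoPtr (altDiffs s.toList) 0 ((altDiffs s.toList).length - 1) with _ | _
  · rw [if_neg, if_neg (by simp)]
    intro hp
    rw [(palindrome_iff_twoPtr _).mp hp] at h
    exact Bool.noConfusion h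
  · rw [if_pos, if_pos rfl]
    exact (palindrome_iff_twoPtr _).mpr h
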